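-- pv_equiv track=rewrite | github.com/spencer-owens/pirate-orb | scripts/queue-cleaner.py | count_audio_files
-- ===== SOURCE A (Python) =====
-- AUDIO_EXTENSIONS = {
--     "flac", "alac", "wav", "aac", "ogg", "mp3", "m4a", "wma", "ape", "opus", "wv",
-- }
--
-- def count_audio_files(status_messages):
--     """Count audio files mentioned in Lidarr queue status messages."""
--     count = 0
--     for msg in status_messages:
--         title = msg.get("title", "")
--         if "." in title:
--             ext = title.rsplit(".", 1)[-1].lower()
--             if ext in AUDIO_EXTENSIONS:
--                 count += 1
--     return count
-- ===== SOURCE B (Python) =====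
-- AUDIO_SUFFIXES = (
--     ".flac", ".alac", ".wav", ".aac", ".ogg", ".mp3", ".m4a", ".wma", ".ape", ".opus", ".wv",
-- )
--
-- def count_audio_files(status_messages):
--     """Count audio files mentioned in Lidarr queue status messages."""
--     return sum(1 for msg in status_messages
--                if msg.get("title", "").lower().endswith(AUDIO_SUFFIXES))
-- ===== Notes on version B (the rewrite author's own statement) =====
-- stated objective: simpler
-- what changed: B replaces A's split-off-the-extension-and-test-set-membership logic by a single suffix test: lowercase the whole title and ask endswith on a tuple of dotted suffixes, summing matches in one expression (no dot check, no rsplit, no intermediate ext variable).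
import Mathlib
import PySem

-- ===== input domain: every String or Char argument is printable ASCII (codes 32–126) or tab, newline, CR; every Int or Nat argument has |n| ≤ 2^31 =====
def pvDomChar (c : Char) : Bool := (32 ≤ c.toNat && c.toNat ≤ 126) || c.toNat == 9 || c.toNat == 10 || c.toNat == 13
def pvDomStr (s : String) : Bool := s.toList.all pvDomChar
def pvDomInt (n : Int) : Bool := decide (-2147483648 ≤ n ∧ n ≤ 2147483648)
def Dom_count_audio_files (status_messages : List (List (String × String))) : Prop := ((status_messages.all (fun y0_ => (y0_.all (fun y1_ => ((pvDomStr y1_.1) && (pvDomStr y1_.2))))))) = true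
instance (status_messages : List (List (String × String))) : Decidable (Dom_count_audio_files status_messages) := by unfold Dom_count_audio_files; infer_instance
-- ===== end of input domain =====

-- B replaces A's split-off-the-extension-then-set-membership logic by a single
-- dotted-suffix test on the lowercased title (objective: simpler, same cost).

-- ===== PORT A =====
-- AUDIO_EXTENSIONS: Python set literal, as PySem.Set (distinct elements)
def audioExts : PySem.Set String :=
  ["flac", "alac", "wav", "aac", "ogg", "mp3", "m4a", "wma", "ape", "opus", "wv"]

-- msg.get(k, dflt) on an association list (lookup = first match) — exact for a dict with unique keys
def pyDictGetD (m : List (String × String)) (k dflt : String) : String :=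
  ((m.find? (fun p => p.1 == k)).map Prod.snd).getD dflt

-- title.rsplit(".", 1)[-1]: the suffix after the LAST '.'; the whole string if there is no '.'.
-- Exact hand port (PySem has no rsplit): reversed take-until-'.' of the reversed characters.
def afterLastDot (s : String) : String :=
  String.ofList ((s.toList.reverse.takeWhile (fun c => c ≠ '.')).reverse)

def count_audio_files (status_messages : List (List (String × String))) : Int :=
  status_messages.foldl
    (fun count msg =>
      let title := pyDictGetD msg "title" ""
      if PySem.Str.isIn "." title then
        let ext := PySem.Str.lower (afterLastDot title)
        if PySem.Set.contains audioExts ext then count + 1 else count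
      else count)
    0

-- ===== PORT B =====
-- AUDIO_SUFFIXES: Python tuple literal
def audioSuffixes : List String :=
  [".flac", ".alac", ".wav", ".aac", ".ogg", ".mp3", ".m4a", ".wma", ".ape", ".opus", ".wv"]

-- sum(1 for msg in … if cond(msg)): count of messages satisfying the condition;
-- str.endswith with a tuple argument = any of the suffixes matches.
def count_audio_files_alt (status_messages : List (List (String × String))) : Int :=
  (status_messages.countP
    (fun msg =>
      audioSuffixes.any
        (fun suf => PySem.Str.endswith (PySem.Str.lower (pyDictGetD msg "title" "")) suf)) : Nat)

-- ===== PRECONDITION & SPEC =====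
def Spec_count_audio_files (status_messages : List (List (String × String))) (out : Int) : Prop := out = count_audio_files_alt status_messages
instance (status_messages : List (List (String × String))) (out : Int) : Decidable (Spec_count_audio_files status_messages out) := by unfold Spec_count_audio_files; infer_instance

-- ===== CLAIM (what is proved, stated in full; the proofs are below) =====
def Claim_equal_count_audio_files : Prop := ∀ (status_messages : List (List (String × String))), Dom_count_audio_files status_messages → Spec_count_audio_files status_messages (count_audio_files status_messages)

-- ===== LEMMAS AND PROOFS =====

-- lowering a character yields '.' only for '.' itself
theorem lowerChar_eq_dot_iff (c : Char) : PySem.Chars.lowerChar c = '.' ↔ c = '.' := by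
  unfold PySem.Chars.lowerChar PySem.Chars.isupper
  split_ifs with h
  · simp only [Bool.and_eq_true, decide_eq_true_eq, Char.le_def, UInt32.le_iff_toNat_le] at h
    have hb : (65 ≤ c.toNat ∧ c.toNat ≤ 90) := by exact_mod_cast h
    constructor
    · intro he
      exfalso
      have := congrArg Char.toNat he
      rw [Char.toNat_ofNat] at this
      have hv : (c.toNat + 32).isValidChar := by constructor <;> omega
      rw [if_pos hv] at this
      have h46 : ('.').toNat = 46 := rfl
      omega
    · intro he; subst he; exact absurd hb (by decide)
  · rfl

-- (le ++ ['.']) is a prefix of r  ↔  r contains a '.' and its longest dot-free prefix is le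
theorem prefix_dotted (le : List Char) (hle : ∀ c ∈ le, c ≠ '.') (r : List Char) :
    (le ++ ['.']) <+: r ↔ ('.' ∈ r ∧ r.takeWhile (fun c => decide (c ≠ '.')) = le) := by
  induction r generalizing le with
  | nil =>
    simp only [List.prefix_nil, List.append_eq_nil_iff, List.mem_nil_iff, false_and, iff_false]
    rintro ⟨-, h⟩; exact List.cons_ne_nil _ _ h
  | cons a r ih =>
    by_cases ha : a = '.'
    · subst ha
      cases le with
      | nil => simp [List.cons_prefix_iff]
      | cons c le' =>
        have hc := hle c (List.mem_cons_self)
        simp only [List.cons_append, List.cons_prefix_iff, List.takeWhile_cons]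
        simp [hc]
        exact fun h => absurd h.symm hc
    · cases le with
      | nil =>
        simp [List.cons_prefix_iff, Ne.symm ha, List.takeWhile_cons, ha]
      | cons c le' =>
        have hih := ih le' (fun x hx => hle x (List.mem_cons_of_mem _ hx))
        have ha' : ('.' : Char) ≠ a := fun h => ha h.symm
        simp only [List.cons_append, List.cons_prefix_iff, List.mem_cons,
          List.takeWhile_cons]
        rw [if_pos (by simpa using ha)]
        constructor
        · rintro ⟨l', heq, hpre⟩
          injection heq with h1 h2
          subst h1; subst h2
          rcases hih.mp hpre with ⟨hd, ht⟩
          exact ⟨Or.inr hd, by rw [ht]⟩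
        · rintro ⟨hd, heq⟩
          injection heq with h1 h2
          subst h1
          have hd' : '.' ∈ r := by
            rcases hd with hd | hd
            · exact absurd hd ha'
            · exact hd
          exact ⟨r, rfl, hih.mpr ⟨hd', h2⟩⟩
-- ('.' :: e) is a suffix of s  ↔  s contains '.' and the part after the last '.' is e
theorem suffix_dotted (e : List Char) (hle : ∀ c ∈ e, c ≠ '.') (s : List Char) :
    ('.' :: e) <:+ s ↔ ('.' ∈ s ∧ (s.reverse.takeWhile (fun c => decide (c ≠ '.'))).reverse = e) := by
  rw [← List.reverse_prefix, List.reverse_cons,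
      prefix_dotted e.reverse (fun c hc => hle c (List.mem_reverse.mp hc))]
  constructor
  · rintro ⟨hd, ht⟩
    exact ⟨List.mem_reverse.mp hd, by rw [ht, List.reverse_reverse]⟩
  · rintro ⟨hd, ht⟩
    exact ⟨List.mem_reverse.mpr hd, by rw [← ht, List.reverse_reverse]⟩

-- lowering commutes with "suffix after the last dot"
theorem toList_lower_afterLastDot (t : String) :
    (PySem.Str.lower (afterLastDot t)).toList
      = (((PySem.Chars.lower t.toList).reverse.takeWhile (fun c => decide (c ≠ '.'))).reverse) := by
  have hpred : (fun c => decide (PySem.Chars.lowerChar c ≠ '.')) = (fun c => decide (c ≠ '.')) := by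
    funext c
    simp [lowerChar_eq_dot_iff c]
  rw [PySem.Str.toList_lower, afterLastDot, String.toList_ofList]
  simp only [PySem.Chars.lower]
  rw [← List.map_reverse, List.takeWhile_map]
  have hc : ((fun c => decide (c ≠ '.')) ∘ PySem.Chars.lowerChar) = (fun c => decide (c ≠ '.')) :=
    funext fun c => by simp [Function.comp, lowerChar_eq_dot_iff c]
  rw [hc, List.map_reverse]

-- "." in t  ↔  '.' occurs among t's characters
theorem isIn_dot_iff (t : String) : PySem.Str.isIn "." t = true ↔ '.' ∈ t.toList := by
  rw [PySem.Str.isIn_eq, PySem.Chars.isIn_iff_infix,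
      show ("." : String).toList = ['.'] by simp, List.singleton_infix_iff]

-- '.' survives lowering in both directions
theorem mem_dot_lower_iff (L : List Char) : '.' ∈ PySem.Chars.lower L ↔ '.' ∈ L := by
  simp only [PySem.Chars.lower, List.mem_map]
  constructor
  · rintro ⟨c, hc, he⟩
    rwa [(lowerChar_eq_dot_iff c).mp he] at hc
  · intro h
    exact ⟨'.', h, (lowerChar_eq_dot_iff '.').mpr rfl⟩

-- endswith one dotted suffix on the lowercased title, characterised by A's two tests
theorem endswith_dotted_iff (t : String) (dotext ext : String)
    (hsplit : dotext.toList = '.' :: ext.toList) (hfree : ∀ c ∈ ext.toList, c ≠ '.') :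
    PySem.Str.endswith (PySem.Str.lower t) dotext = true
      ↔ ('.' ∈ t.toList ∧ PySem.Str.lower (afterLastDot t) = ext) := by
  rw [PySem.Str.endswith_eq, PySem.Chars.endswith_iff, PySem.Str.toList_lower, hsplit,
      suffix_dotted ext.toList hfree _, mem_dot_lower_iff, ← toList_lower_afterLastDot t]
  constructor
  · rintro ⟨hd, ht⟩
    exact ⟨hd, String.toList_inj.mp ht⟩
  · rintro ⟨hd, ht⟩
    exact ⟨hd, by rw [ht]⟩

-- B's per-message test ↔ A's per-message pair of tests
set_option maxHeartbeats 2000000 in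
theorem cond_iff (t : String) :
    (audioSuffixes.any (fun suf => PySem.Str.endswith (PySem.Str.lower t) suf) = true)
      ↔ (PySem.Str.isIn "." t = true
          ∧ PySem.Set.contains audioExts (PySem.Str.lower (afterLastDot t)) = true) := by
  rw [isIn_dot_iff, PySem.Set.contains_iff]
  simp only [audioSuffixes, List.any_cons, List.any_nil, Bool.or_eq_true, Bool.false_eq_true,
    or_false, audioExts, List.mem_cons, List.mem_nil_iff]
  rw [endswith_dotted_iff t ".flac" "flac" (by simp) (by simp),
      endswith_dotted_iff t ".alac" "alac" (by simp) (by simp),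
      endswith_dotted_iff t ".wav" "wav" (by simp) (by simp),
      endswith_dotted_iff t ".aac" "aac" (by simp) (by simp),
      endswith_dotted_iff t ".ogg" "ogg" (by simp) (by simp),
      endswith_dotted_iff t ".mp3" "mp3" (by simp) (by simp),
      endswith_dotted_iff t ".m4a" "m4a" (by simp) (by simp),
      endswith_dotted_iff t ".wma" "wma" (by simp) (by simp),
      endswith_dotted_iff t ".ape" "ape" (by simp) (by simp),
      endswith_dotted_iff t ".opus" "opus" (by simp) (by simp),
      endswith_dotted_iff t ".wv" "wv" (by simp) (by simp)]
  simp only [and_or_left]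

-- A's loop, started at any accumulator, counts B's predicate
theorem foldl_eq_countP (msgs : List (List (String × String))) (c : Int) :
    msgs.foldl
      (fun count msg =>
        let title := pyDictGetD msg "title" ""
        if PySem.Str.isIn "." title then
          let ext := PySem.Str.lower (afterLastDot title)
          if PySem.Set.contains audioExts ext then count + 1 else count
        else count) c
    = c + (msgs.countP
        (fun msg =>
          audioSuffixes.any
            (fun suf => PySem.Str.endswith (PySem.Str.lower (pyDictGetD msg "title" "")) suf)) : Nat) := by
  induction msgs generalizing c with
  | nil => simp
  | cons m ms ih =>
    simp only [List.foldl_cons, List.countP_cons]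
    set t := pyDictGetD m "title" "" with ht
    by_cases hp : (audioSuffixes.any (fun suf => PySem.Str.endswith (PySem.Str.lower t) suf)) = true
    · rcases (cond_iff t).mp hp with ⟨h1, h2⟩
      simp only [h1, h2, if_true, hp, ih]
      push_cast
      ring
    · have h12 := (cond_iff t).not.mp hp
      push_neg at h12
      simp only [hp, if_false, ih]
      by_cases h1 : PySem.Str.isIn "." t = true
      · simp only [h1, if_true]
        rw [if_neg (h12 h1)]
        simp
      · simp only [h1, if_false]
        simp [Bool.not_eq_true] at h1
        simp [h1]

-- ===== VERDICT (by name: the statement is the Claim_ definition above) =====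
theorem count_audio_files_spec : Claim_equal_count_audio_files := by
  intro msgs _
  unfold Spec_count_audio_files count_audio_files count_audio_files_alt
  rw [foldl_eq_countP msgs 0]
  simp
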